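-- pv_equiv track=rewrite | github.com/alyssaschaubroeck/Informatica5 | 12b - Roosters/Kleurendriehoek.py | kleuren
-- ===== SOURCE A (Python) =====
-- def kleuren(driehoek):
--     groen = 0
--     rood = 0
--     geel = 0
--     for i in range(len(driehoek)):
--         for b in range(len(driehoek[i])):
--             kleur = driehoek[i][b]
--             if kleur == 'G':
--                 groen += 1
--             elif kleur == 'R':
--                 rood += 1
--             elif kleur == 'Y':
--                 geel += 1
--     return (groen, rood, geel)
-- ===== SOURCE B (Python) =====
-- def kleuren(driehoek):
--     flat = [c for row in driehoek for c in row]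
--     return (flat.count('G'), flat.count('R'), flat.count('Y'))
-- ===== Notes on version B (the rewrite author's own statement) =====
-- stated objective: idiomatic
-- what changed: Replaces the index-based nested loops with per-color if/elif accumulators by flattening the grid once and returning three list.count lookups.
import Mathlib
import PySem

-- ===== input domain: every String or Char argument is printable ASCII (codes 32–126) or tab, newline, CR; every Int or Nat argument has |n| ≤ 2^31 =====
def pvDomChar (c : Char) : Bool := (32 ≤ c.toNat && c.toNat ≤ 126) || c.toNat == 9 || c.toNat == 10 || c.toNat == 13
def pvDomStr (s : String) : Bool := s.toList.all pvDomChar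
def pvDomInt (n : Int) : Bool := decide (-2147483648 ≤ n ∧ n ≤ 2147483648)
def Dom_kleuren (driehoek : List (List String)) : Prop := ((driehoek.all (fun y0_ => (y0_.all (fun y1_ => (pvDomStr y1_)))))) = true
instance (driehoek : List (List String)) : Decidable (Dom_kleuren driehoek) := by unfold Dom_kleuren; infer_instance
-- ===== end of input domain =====

-- B flattens the grid once and returns three list.count lookups instead of A's indexed nested
-- loops with per-color if/elif accumulators (objective: idiomatic; same cost).

-- ===== PORT A =====
def kleuren (driehoek : List (List String)) : Int × Int × Int :=
  let step := fun (st : Int × Int × Int) (kleur : String) =>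
    if kleur = "G" then (st.1 + 1, st.2.1, st.2.2)
    else if kleur = "R" then (st.1, st.2.1 + 1, st.2.2)
    else if kleur = "Y" then (st.1, st.2.1, st.2.2 + 1)
    else st
  (PySem.List.pyRange 0 (PySem.List.len driehoek) 1).foldl
    (fun st i =>
      let row := PySem.List.pyGetD driehoek i []
      (PySem.List.pyRange 0 (PySem.List.len row) 1).foldl
        (fun st b => step st (PySem.List.pyGetD row b "")) st)
    (0, 0, 0)

-- ===== PORT B =====
def kleuren_alt (driehoek : List (List String)) : Int × Int × Int :=
  let flat := driehoek.flatMap (fun row => row)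
  ((PySem.List.count flat "G" : Int), (PySem.List.count flat "R" : Int), (PySem.List.count flat "Y" : Int))

-- ===== PRECONDITION & SPEC =====
def Spec_kleuren (driehoek : List (List String)) (out : Int × Int × Int) : Prop := out = kleuren_alt driehoek
instance (driehoek : List (List String)) (out : Int × Int × Int) : Decidable (Spec_kleuren driehoek out) := by unfold Spec_kleuren; infer_instance

-- ===== CLAIM (what is proved, stated in full; the proofs are below) =====
def Claim_equal_kleuren : Prop := ∀ (driehoek : List (List String)), Dom_kleuren driehoek → Spec_kleuren driehoek (kleuren driehoek)

-- ===== LEMMAS AND PROOFS =====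

-- one row of A's loop, from an arbitrary accumulator, adds the three counts of that row
theorem kleuren_row (row : List String) (g r y : Int) :
    row.foldl (fun (st : Int × Int × Int) (kleur : String) =>
        if kleur = "G" then (st.1 + 1, st.2.1, st.2.2)
        else if kleur = "R" then (st.1, st.2.1 + 1, st.2.2)
        else if kleur = "Y" then (st.1, st.2.1, st.2.2 + 1)
        else st) (g, r, y)
      = (g + List.count "G" row, r + List.count "R" row, y + List.count "Y" row) := by
  induction row generalizing g r y with
  | nil => simp
  | cons h t ih =>
    by_cases hG : h = "G"
    · simp [hG, ih]; omega
    · by_cases hR : h = "R"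
      · simp [hR, ih]; omega
      · by_cases hY : h = "Y"
        · simp [hY, ih]; omega
        · simp [hG, hR, hY, ih]

-- A's per-row loop written over range indices, accumulated over all rows, gives the flat counts
theorem kleuren_main (driehoek : List (List String)) (g r y : Int) :
    driehoek.foldl (fun (st : Int × Int × Int) (row : List String) =>
        (PySem.List.pyRange 0 (PySem.List.len row) 1).foldl
          (fun (st : Int × Int × Int) (b : Int) =>
            let kleur := PySem.List.pyGetD row b ""
            if kleur = "G" then (st.1 + 1, st.2.1, st.2.2)
            else if kleur = "R" then (st.1, st.2.1 + 1, st.2.2)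
            else if kleur = "Y" then (st.1, st.2.1, st.2.2 + 1)
            else st) st) (g, r, y)
      = (g + List.count "G" (driehoek.flatMap (fun row => row)),
         r + List.count "R" (driehoek.flatMap (fun row => row)),
         y + List.count "Y" (driehoek.flatMap (fun row => row))) := by
  induction driehoek generalizing g r y with
  | nil => simp
  | cons h t ih =>
    rw [List.foldl_cons,
        PySem.List.foldl_pyRange_zero_pyGetD h ""
          (fun (st : Int × Int × Int) (kleur : String) =>
            if kleur = "G" then (st.1 + 1, st.2.1, st.2.2)
            else if kleur = "R" then (st.1, st.2.1 + 1, st.2.2)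
            else if kleur = "Y" then (st.1, st.2.1, st.2.2 + 1)
            else st),
        kleuren_row, ih]
    simp only [List.flatMap_cons, List.count_append, Prod.mk.injEq]
    push_cast
    refine ⟨by ring, by ring, by ring⟩

-- ===== VERDICT (by name: the statement is the Claim_ definition above) =====
theorem kleuren_spec : Claim_equal_kleuren := by
  intro driehoek _
  show kleuren driehoek = kleuren_alt driehoek
  unfold kleuren kleuren_alt
  rw [PySem.List.foldl_pyRange_zero_pyGetD driehoek []
        (fun (st : Int × Int × Int) (row : List String) =>
          (PySem.List.pyRange 0 (PySem.List.len row) 1).foldl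
            (fun (st : Int × Int × Int) (b : Int) =>
              let kleur := PySem.List.pyGetD row b ""
              if kleur = "G" then (st.1 + 1, st.2.1, st.2.2)
              else if kleur = "R" then (st.1, st.2.1 + 1, st.2.2)
              else if kleur = "Y" then (st.1, st.2.1, st.2.2 + 1)
              else st) st),
      kleuren_main]
  simp [PySem.List.count_eq]
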